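-- pv_equiv track=rewrite | github.com/wardog21/AoC | 2024/22/main.py | calcSecret
-- ===== SOURCE A (Python) =====
-- def calcSecret(input, iterations):
--     secret = input
--     for i in range(iterations):
--         secret ^= (secret*64)
--         secret %= 16777216
--         secret ^= (secret//32)
--         secret %= 16777216
--         secret ^= (secret*2048)
--         secret %= 16777216
--     return secret
-- ===== SOURCE B (Python) =====
-- def calcSecret(input, iterations):
--     # Cycle detection: the state space is finite (2**24 after one step), so the
--     # orbit is eventually periodic; once a repeated state is seen we jump ahead
--     # with a modulus instead of iterating the remaining steps one by one.
--     M = 16777216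
--
--     def step(x):
--         x = (x ^ (x * 64)) % M
--         x = (x ^ (x // 32)) % M
--         x = (x ^ (x * 2048)) % M
--         return x
--
--     seen = {}
--     x = input
--     i = 0
--     while i < iterations:
--         if x in seen:
--             p = i - seen[x]
--             rem = (iterations - i) % p
--             for _ in range(rem):
--                 x = step(x)
--             return x
--         seen[x] = i
--         x = step(x)
--         i += 1
--     return x
-- ===== Notes on version B (the rewrite author's own statement) =====
-- stated objective: alternative
-- what changed: B memoizes the visited secret values in a dictionary and, on the first repeated state, jumps ahead by taking the remaining iteration count modulo the detected cycle length instead of iterating every remaining step.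
import Mathlib
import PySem

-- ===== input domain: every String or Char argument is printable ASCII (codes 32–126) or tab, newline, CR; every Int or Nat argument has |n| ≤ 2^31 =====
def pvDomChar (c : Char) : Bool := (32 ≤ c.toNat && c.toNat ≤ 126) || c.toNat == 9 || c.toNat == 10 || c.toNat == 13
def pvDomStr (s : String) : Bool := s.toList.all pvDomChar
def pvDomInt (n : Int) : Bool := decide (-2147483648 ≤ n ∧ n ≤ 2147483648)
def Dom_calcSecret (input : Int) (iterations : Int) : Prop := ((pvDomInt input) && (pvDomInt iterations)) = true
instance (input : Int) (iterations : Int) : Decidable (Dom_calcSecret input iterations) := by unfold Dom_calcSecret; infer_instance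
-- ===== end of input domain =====

-- B replaces A's step-by-step loop with cycle detection on the finite state orbit
-- (remember seen states; on a repeat, jump ahead modulo the period): objective 'alternative'.

-- ===== PORT A =====
def calcSecret (input : Int) (iterations : Int) : Int :=
  (PySem.List.pyRange 0 iterations 1).foldl (fun secret _ =>
    let s1 := PySem.Int.mod (PySem.Int.bxor secret (secret * 64)) 16777216
    let s2 := PySem.Int.mod (PySem.Int.bxor s1 (PySem.Int.floordiv s1 32)) 16777216
    PySem.Int.mod (PySem.Int.bxor s2 (s2 * 2048)) 16777216) input

-- ===== PORT B =====
-- Source B's helper `step`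
def pvStepB (x : Int) : Int :=
  let x1 := PySem.Int.mod (PySem.Int.bxor x (x * 64)) 16777216
  let x2 := PySem.Int.mod (PySem.Int.bxor x1 (PySem.Int.floordiv x1 32)) 16777216
  PySem.Int.mod (PySem.Int.bxor x2 (x2 * 2048)) 16777216

-- Source B's `for _ in range(rem): x = step(x)`
def pvStepNB : Nat → Int → Int
  | 0, x => x
  | n + 1, x => pvStepNB n (pvStepB x)

-- Source B's `while i < iterations` loop; the fuel n is the number of remaining iterations
def pvLoopB (iterations : Int) (seen : PySem.Dict Int Int) (x : Int) (i : Int) : Nat → Int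
  | 0 => x
  | n + 1 =>
    match seen.get? x with
    | some j =>
        let p := i - j
        let rem := PySem.Int.mod (iterations - i) p
        pvStepNB rem.toNat x
    | none => pvLoopB iterations (seen.insert x i) (pvStepB x) (i + 1) n

def calcSecret_alt (input : Int) (iterations : Int) : Int :=
  pvLoopB iterations PySem.Dict.empty input 0 iterations.toNat

-- ===== PRECONDITION & SPEC =====
def Spec_calcSecret (input : Int) (iterations : Int) (out : Int) : Prop := out = calcSecret_alt input iterations
instance (input : Int) (iterations : Int) (out : Int) : Decidable (Spec_calcSecret input iterations out) := by unfold Spec_calcSecret; infer_instance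

-- ===== CLAIM (what is proved, stated in full; the proofs are below) =====
def Claim_equal_calcSecret : Prop := ∀ (input : Int) (iterations : Int), Dom_calcSecret input iterations → Spec_calcSecret input iterations (calcSecret input iterations)

-- ===== LEMMAS AND PROOFS =====

theorem pvStepNB_add (m n : Nat) (x : Int) :
    pvStepNB (m + n) x = pvStepNB n (pvStepNB m x) := by
  induction m generalizing x with
  | zero => simp [pvStepNB]
  | succ k ih =>
      have : k + 1 + n = (k + n) + 1 := by omega
      rw [this]
      simp only [pvStepNB]
      exact ih (pvStepB x)

theorem pvStepNB_succ' (k : Nat) (x : Int) :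
    pvStepNB (k + 1) x = pvStepB (pvStepNB k x) := by
  rw [pvStepNB_add k 1 x]; rfl

theorem pvStepNB_mod (p : Nat) (hp : 0 < p) (x : Int) (hx : pvStepNB p x = x) :
    ∀ n, pvStepNB n x = pvStepNB (n % p) x := by
  intro n
  induction n using Nat.strong_induction_on with
  | _ n ih =>
    by_cases h : n < p
    · rw [Nat.mod_eq_of_lt h]
    · have hn : n = p + (n - p) := by omega
      rw [hn, pvStepNB_add, hx, ih (n - p) (by omega)]
      rw [Nat.add_mod_left]

def pvInv (seen : PySem.Dict Int Int) (x : Int) (i : Int) : Prop :=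
  ∀ s j, seen.get? s = some j → 0 ≤ j ∧ j < i ∧ pvStepNB (i - j).toNat s = x

theorem pvLoopB_eq (iterations : Int) :
    ∀ (n : Nat) (seen : PySem.Dict Int Int) (x : Int) (i : Int),
      0 ≤ i → (iterations - i = (n : Int) ∨ n = 0) → pvInv seen x i →
      pvLoopB iterations seen x i n = pvStepNB n x := by
  intro n
  induction n with
  | zero => intro seen x i _ _ _; rfl
  | succ k ih =>
    intro seen x i hi hfuel hinv
    have hiter : iterations - i = ((k : Int) + 1) := by
      rcases hfuel with h | h
      · push_cast at h; omega
      · omega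
    simp only [pvLoopB]
    cases hg : seen.get? x with
    | some j =>
        simp only []
        obtain ⟨hj0, hji, hper⟩ := hinv x j hg
        set pn : Nat := (i - j).toNat with hpn
        have hpn0 : 0 < pn := by omega
        have hpcast : i - j = (pn : Int) := by omega
        have hmod : PySem.Int.mod (iterations - i) (i - j) = (((k + 1) % pn : Nat) : Int) := by
          rw [PySem.Int.mod_eq_emod_of_pos (show (0:Int) < i - j by omega), hiter, hpcast]
          norm_cast
        rw [hmod]
        rw [Int.toNat_natCast]
        exact (pvStepNB_mod pn hpn0 x hper (k + 1)).symm
    | none =>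
        apply ih
        · omega
        · left; omega
        · intro s j hget
          rcases eq_or_ne s x with rfl | hne
          · rw [PySem.Dict.get?_insert_self] at hget
            obtain rfl := Option.some.inj hget
            refine ⟨by omega, by omega, ?_⟩
            have : (i + 1 - i).toNat = 1 := by omega
            rw [this]; rfl
          · rw [PySem.Dict.get?_insert_of_ne _ _ hne] at hget
            obtain ⟨hj0, hji, hper⟩ := hinv s j hget
            refine ⟨hj0, by omega, ?_⟩
            have : (i + 1 - j).toNat = (i - j).toNat + 1 := by omega
            rw [this, pvStepNB_succ', hper]

theorem calcSecret_eq_stepNB (input iterations : Int) :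
    calcSecret input iterations = pvStepNB iterations.toNat input := by
  unfold calcSecret
  have hfold : ∀ (l : List Int) (x : Int),
      l.foldl (fun secret (_ : Int) =>
        let s1 := PySem.Int.mod (PySem.Int.bxor secret (secret * 64)) 16777216
        let s2 := PySem.Int.mod (PySem.Int.bxor s1 (PySem.Int.floordiv s1 32)) 16777216
        PySem.Int.mod (PySem.Int.bxor s2 (s2 * 2048)) 16777216) x = pvStepNB l.length x := by
    intro l
    induction l with
    | nil => intro x; rfl
    | cons a t ih => intro x; simp only [List.foldl, List.length_cons]; rw [ih]; rfl
  rw [hfold]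
  congr 1
  rw [PySem.List.length_pyRange_one]
  omega

-- ===== VERDICT (by name: the statement is the Claim_ definition above) =====
theorem calcSecret_spec : Claim_equal_calcSecret := by
  intro input iterations _
  unfold Spec_calcSecret calcSecret_alt
  rw [calcSecret_eq_stepNB]
  symm
  apply pvLoopB_eq
  · omega
  · by_cases h : 0 ≤ iterations
    · left; omega
    · right; omega
  · intro s j hget
    rw [PySem.Dict.get?_empty] at hget
    exact absurd hget (by simp)
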